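-- pv_equiv track=rewrite | github.com/BlockZeroDOO/denotary-db-agent | tests/oracle_live_support.py | split_oracle_blocks
-- ===== SOURCE A (Python) =====
-- def split_oracle_blocks(script: str) -> list[str]:
--     blocks: list[str] = []
--     current: list[str] = []
--     for line in script.splitlines():
--         if line.strip() == "/":
--             block = "\n".join(current).strip()
--             if block:
--                 blocks.append(block)
--             current = []
--             continue
--         current.append(line)
--     block = "\n".join(current).strip()
--     if block:
--         blocks.append(block)
--     return blocks
-- ===== SOURCE B (Python) =====
-- def split_oracle_blocks(script: str) -> list[str]:
--     # Recursive divide-at-first-delimiter: scan for the first '/' line, emit the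
--     # prefix as a block (if nonempty after strip), and recurse on the suffix.
--     # No running accumulator / flush state machine.
--     def rec(lines: list[str]) -> list[str]:
--         i = 0
--         while i < len(lines) and lines[i].strip() != "/":
--             i += 1
--         block = "\n".join(lines[:i]).strip()
--         emitted = [block] if block else []
--         if i == len(lines):
--             return emitted
--         return emitted + rec(lines[i + 1:])
--     return rec(script.splitlines())
-- ===== Notes on version B (the rewrite author's own statement) =====
-- stated objective: alternative
-- what changed: Replaces A's single-pass accumulator/flush state machine with a recursive divide-at-first-delimiter: find the first '/' line, emit the prefix slice as a block, and recurse on the remaining suffix.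
import Mathlib
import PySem

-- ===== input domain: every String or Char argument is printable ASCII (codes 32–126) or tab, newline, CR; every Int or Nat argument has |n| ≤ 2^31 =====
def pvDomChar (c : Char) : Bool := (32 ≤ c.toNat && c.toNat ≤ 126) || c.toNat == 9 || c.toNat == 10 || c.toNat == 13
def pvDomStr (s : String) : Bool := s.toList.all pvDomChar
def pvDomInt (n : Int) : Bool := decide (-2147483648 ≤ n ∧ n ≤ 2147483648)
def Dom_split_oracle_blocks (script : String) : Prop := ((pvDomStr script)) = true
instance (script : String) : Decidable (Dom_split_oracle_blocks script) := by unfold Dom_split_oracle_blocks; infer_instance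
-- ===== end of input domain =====

-- B replaces A's accumulator/flush state machine by a recursive divide-at-first-delimiter (objective: alternative).

-- ===== PORT A =====
-- the for-loop of A as structural recursion over the lines, state = (blocks, current);
-- the [] case is the post-loop flush
def pvLoopA (blocks current : List String) : List String → List String
  | [] =>
    let block := PySem.Str.strip (PySem.Str.join "\n" current)
    if block == "" then blocks else blocks ++ [block]
  | line :: rest =>
    if PySem.Str.strip line == "/" then
      let block := PySem.Str.strip (PySem.Str.join "\n" current)
      pvLoopA (if block == "" then blocks else blocks ++ [block]) [] rest
    else
      pvLoopA blocks (current ++ [line]) rest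

def split_oracle_blocks (script : String) : List String :=
  pvLoopA [] [] (PySem.Str.splitlines script)

-- ===== PORT B =====
-- line is not a delimiter ('/' after strip)
def pvNotDelim (line : String) : Bool := !(PySem.Str.strip line == "/")

-- B's rec: the while loop finds the first delimiter, i.e. splits lines into
-- takeWhile/dropWhile on pvNotDelim (lines[:i] / lines[i:]); emit the prefix,
-- recurse past the delimiter
def pvRecB (lines : List String) : List String :=
  let head := lines.takeWhile pvNotDelim
  let block := PySem.Str.strip (PySem.Str.join "\n" head)
  let emitted := if block == "" then [] else [block]
  match h : lines.dropWhile pvNotDelim with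
  | [] => emitted
  | _ :: tail => emitted ++ pvRecB tail
termination_by lines.length
decreasing_by
  have h1 : (lines.dropWhile pvNotDelim).length ≤ lines.length :=
    (List.dropWhile_sublist (l := lines) (p := pvNotDelim)).length_le
  rw [h] at h1
  simp at h1
  omega

def split_oracle_blocks_alt (script : String) : List String :=
  pvRecB (PySem.Str.splitlines script)

-- ===== PRECONDITION & SPEC =====
def Spec_split_oracle_blocks (script : String) (out : List String) : Prop := out = split_oracle_blocks_alt script
instance (script : String) (out : List String) : Decidable (Spec_split_oracle_blocks script out) := by unfold Spec_split_oracle_blocks; infer_instance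

-- ===== CLAIM (what is proved, stated in full; the proofs are below) =====
def Claim_equal_split_oracle_blocks : Prop := ∀ (script : String), Dom_split_oracle_blocks script → Spec_split_oracle_blocks script (split_oracle_blocks script)

-- ===== LEMMAS AND PROOFS =====

-- common intermediary: the list of line-groups separated by '/'-lines, starting from group `cur`
def pvSplit (cur : List String) : List String → List (List String)
  | [] => [cur]
  | l :: rest =>
    if PySem.Str.strip l == "/" then cur :: pvSplit [] rest
    else pvSplit (cur ++ [l]) rest

-- '\n'.join(g).strip(), kept only if truthy
def pvEmit (g : List String) : Option String :=
  let b := PySem.Str.strip (PySem.Str.join "\n" g)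
  if b == "" then none else some b

-- A's loop = already-emitted blocks ++ the filtered/joined groups
theorem pvLoopA_eq (lines : List String) : ∀ (blocks cur : List String),
    pvLoopA blocks cur lines = blocks ++ (pvSplit cur lines).filterMap pvEmit := by
  induction lines with
  | nil =>
    intro blocks cur
    simp only [pvLoopA, pvSplit, List.filterMap, pvEmit]
    split <;> simp
  | cons l rest ih =>
    intro blocks cur
    simp only [pvLoopA, pvSplit]
    by_cases h : (PySem.Str.strip l == "/") = true
    · simp only [h, if_true, List.filterMap_cons]
      rw [ih]
      simp only [pvEmit]
      split <;> simp_all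
    · simp only [Bool.not_eq_true] at h
      simp only [h]
      exact ih blocks (cur ++ [l])

theorem pvTakeWhile_append (cur rest : List String) (hc : ∀ l ∈ cur, pvNotDelim l = true) :
    (cur ++ rest).takeWhile pvNotDelim = cur ++ rest.takeWhile pvNotDelim := by
  induction cur with
  | nil => simp
  | cons x xs ih =>
    simp only [List.cons_append, List.takeWhile_cons, hc x (by simp), if_true]
    rw [ih (fun l hl => hc l (by simp [hl]))]

theorem pvDropWhile_append (cur rest : List String) (hc : ∀ l ∈ cur, pvNotDelim l = true) :
    (cur ++ rest).dropWhile pvNotDelim = rest.dropWhile pvNotDelim := by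
  induction cur with
  | nil => simp
  | cons x xs ih =>
    simp only [List.cons_append, List.dropWhile_cons, hc x (by simp), if_true]
    exact ih (fun l hl => hc l (by simp [hl]))

-- B's recursion = the filtered/joined groups, for a delimiter-free carried prefix
theorem pvRecB_eq (lines : List String) : ∀ (cur : List String),
    (∀ l ∈ cur, pvNotDelim l = true) →
    pvRecB (cur ++ lines) = (pvSplit cur lines).filterMap pvEmit := by
  induction lines with
  | nil =>
    intro cur hc
    have hdw : List.dropWhile pvNotDelim (cur ++ []) = [] := by
      simpa using List.dropWhile_eq_nil_iff.mpr (by intro x hx; simpa using hc x hx)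
    have htw : List.takeWhile pvNotDelim (cur ++ []) = cur := by
      simpa using List.takeWhile_eq_self_iff.mpr hc
    rw [pvRecB]
    split
    · rw [htw]
      simp only [pvSplit, List.filterMap, pvEmit]
      split <;> simp
    · rename_i heq
      simp only [List.append_nil] at hdw heq
      rw [hdw] at heq
      exact absurd heq (by simp)
  | cons l rest ih =>
    intro cur hc
    by_cases h : (PySem.Str.strip l == "/") = true
    · have hnd : pvNotDelim l = false := by simp [pvNotDelim, h]
      have hdw : List.dropWhile pvNotDelim (cur ++ l :: rest) = l :: rest := by
        rw [pvDropWhile_append cur (l :: rest) hc]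
        simp [hnd]
      have htw : List.takeWhile pvNotDelim (cur ++ l :: rest) = cur := by
        rw [pvTakeWhile_append cur (l :: rest) hc]
        simp [hnd]
      rw [pvRecB]
      split
      · simp_all
      · rename_i heq
        rw [hdw] at heq
        cases heq
        rw [htw, show pvRecB rest = pvRecB ([] ++ rest) from by simp, ih [] (by simp)]
        simp only [pvSplit, h, if_true, List.filterMap_cons, pvEmit]
        split <;> simp_all
    · have hnd : pvNotDelim l = true := by simp [pvNotDelim, h]
      have hrw : cur ++ l :: rest = (cur ++ [l]) ++ rest := by simp
      rw [hrw, ih (cur ++ [l]) (by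
        intro x hx
        rcases List.mem_append.mp hx with h' | h'
        · exact hc x h'
        · simp at h'; subst h'; exact hnd)]
      simp only [pvSplit]
      rw [if_neg (by simpa using h)]

-- ===== VERDICT (by name: the statement is the Claim_ definition above) =====
theorem split_oracle_blocks_spec : Claim_equal_split_oracle_blocks := by
  intro script _
  unfold Spec_split_oracle_blocks split_oracle_blocks split_oracle_blocks_alt
  rw [pvLoopA_eq, show PySem.Str.splitlines script = [] ++ PySem.Str.splitlines script from rfl,
    pvRecB_eq _ [] (by simp)]
  simp
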